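-- pv_equiv track=rewrite | github.com/guojihu-hana/PipelineSimulator | Executor.py | balanced_transpose
-- ===== SOURCE A (Python) =====
-- from collections import defaultdict
-- import heapq
--
-- def balanced_transpose(placement, layer_comp_time):
--     # 原始行的总开销
--     original_cost = [sum(layer_comp_time[l] for l in row) for row in placement]
--     num_rows = len(placement)
--
--     # 分组 comp time -> list of layers
--     comp_groups = defaultdict(list)
--     for row in placement:
--         for l in row:
--             comp_groups[layer_comp_time[l]].append(l)
--
--     # 将 comp time 从大到小排序
--     comp_times = sorted(comp_groups.keys(), reverse=True)
--
--     # 新的空 placement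
--     new_place = [[] for _ in range(num_rows)]
--     new_cost = [0] * num_rows
--
--     # 一个小根堆按 (当前开销, 行号) 排序
--     # 这样每次将更重的 layer 放到当前最轻的行
--     heap = [(0, i) for i in range(num_rows)]
--     heapq.heapify(heap)
--
--     # 按 comp time 从大到小填充
--     for comp in comp_times:
--         layers = sorted(comp_groups[comp])  # 保证稳定顺序
--         for l in layers:
--             cost, idx = heapq.heappop(heap)
--             new_place[idx].append(l)
--             new_cost[idx] += layer_comp_time[l]
--             heapq.heappush(heap, (new_cost[idx], idx))
--
--     # 最终按每行第一个 layer 升序排序保证干净布局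
--     new_place.sort(key=lambda row: row[0] if row else 1e9)
--
--     return new_place
-- ===== SOURCE B (Python) =====
-- def balanced_transpose(placement, layer_comp_time):
--     num_rows = len(placement)
--     # one flat sort replaces the comp-time grouping dict + two-level sort:
--     # heaviest comp time first, equal comp times by ascending layer id
--     layers = sorted((l for row in placement for l in row),
--                     key=lambda l: (-layer_comp_time[l], l))
--     new_place = [[] for _ in range(num_rows)]
--     new_cost = [0] * num_rows
--     for l in layers:
--         idx = min(range(num_rows), key=lambda i: (new_cost[i], i))
--         new_place[idx].append(l)
--         new_cost[idx] += layer_comp_time[l]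
--     new_place.sort(key=lambda row: row[0] if row else 10**9)
--     return new_place
-- ===== Notes on version B (the rewrite author's own statement) =====
-- stated objective: simpler
-- what changed: B replaces A's comp-time->layers defaultdict grouping, per-group sorts over descending comp times, and heapq priority queue by one flat sort of all layers keyed on (-comp_time, layer) plus a plain argmin scan over a cost array per layer; tie-breaking (lowest-cost row, then lowest index) is reproduced by the (cost, index) key.
import Mathlib
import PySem

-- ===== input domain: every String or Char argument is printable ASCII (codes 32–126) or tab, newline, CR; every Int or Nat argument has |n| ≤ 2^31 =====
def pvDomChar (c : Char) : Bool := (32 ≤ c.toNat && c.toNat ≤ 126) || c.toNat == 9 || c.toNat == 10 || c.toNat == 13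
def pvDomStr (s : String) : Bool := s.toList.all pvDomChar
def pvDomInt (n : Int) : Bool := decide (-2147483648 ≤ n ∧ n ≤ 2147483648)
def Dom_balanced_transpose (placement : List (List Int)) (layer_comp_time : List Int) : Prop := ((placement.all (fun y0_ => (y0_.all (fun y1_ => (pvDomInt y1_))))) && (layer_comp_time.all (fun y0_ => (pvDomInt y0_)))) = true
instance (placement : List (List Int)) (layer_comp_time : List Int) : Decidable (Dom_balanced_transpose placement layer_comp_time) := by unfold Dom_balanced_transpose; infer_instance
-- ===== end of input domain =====

-- B replaces A's comp-time grouping dict + per-group sorts + heapq priority queue by ONE flat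
-- sort of all layers (key: comp time descending, layer ascending) and a plain argmin scan over
-- the row costs; objective: simpler (same results, flatter code). Return values only; neither
-- program mutates its arguments.

-- ===== PORT A =====
-- layer_comp_time[l] (Python negative-index rule; exact under Pre_, which rules out IndexError)
def pvT (layer_comp_time : List Int) (l : Int) : Int := PySem.List.pyGetD layer_comp_time l 0

-- final sort key `row[0] if row else 1e9`: the float 1e9 compares with every Python int exactly
-- like the integer 10^9 (int/float comparison is exact in Python), so an Int sentinel is exact
def pvRowKey (row : List Int) : Int := match row with | [] => 1000000000 | x :: _ => x

-- heapq is a standard-library call, ported by its contract: a priority queue of (cost, idx)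
-- pairs under Python's lexicographic tuple order — heappop removes and returns the smallest
-- pair, heappush inserts; modelled as a list kept sorted (heapify = sort, pop = head,
-- push = ordered insert).  This is exact for A: every pair in the queue carries a distinct
-- row index idx, so the smallest pair is unique and pop order is fully determined.
def pvBefore (a b : Int × Nat) : Bool := decide ((toLex a : Lex (Int × Nat)) < toLex b)

def pvHeapify (h : List (Int × Nat)) : List (Int × Nat) :=
  PySem.List.sorted h (fun p => (toLex p : Lex (Int × Nat))) false

def pvHeappush (h : List (Int × Nat)) (x : Int × Nat) : List (Int × Nat) :=
  PySem.List.insertBy pvBefore x h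

-- the defaultdict(list) grouping comp time -> layers (Python's two nested for-loops)
def pvGroups (placement : List (List Int)) (layer_comp_time : List Int) : PySem.Dict Int (List Int) :=
  placement.foldl
    (fun d row => row.foldl (fun d l => d.modify (pvT layer_comp_time l) [] (fun g => g ++ [l])) d)
    PySem.Dict.empty

-- one iteration of A's inner loop: heappop, append the layer, add its time, heappush
def pvStepA (layer_comp_time : List Int)
    (st : List (Int × Nat) × List (List Int) × List Int) (l : Int) :
    List (Int × Nat) × List (List Int) × List Int :=
  match st with
  | (heap, place, cost) =>
    match heap with
    | [] => (heap, place, cost)   -- heappop of an empty heap: unreachable (one pair per row is always queued)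
    | p :: t =>
      let idx := p.2
      let c' := cost.getD idx 0 + pvT layer_comp_time l
      (pvHeappush t (c', idx), place.set idx (place.getD idx [] ++ [l]), cost.set idx c')

def balanced_transpose (placement : List (List Int)) (layer_comp_time : List Int) : List (List Int) :=
  let _original_cost := placement.map (fun row => (row.map (fun l => pvT layer_comp_time l)).sum)
  let num_rows := placement.length
  let comp_groups := pvGroups placement layer_comp_time
  let comp_times := PySem.List.sorted comp_groups.keys (fun x => x) true
  let init : List (Int × Nat) × List (List Int) × List Int :=
    (pvHeapify ((List.range num_rows).map (fun i => ((0 : Int), i))),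
     (List.range num_rows).map (fun _ => []),
     (List.range num_rows).map (fun _ => (0 : Int)))
  let fin := comp_times.foldl
    (fun st comp =>
      (PySem.List.sorted (comp_groups.getD comp []) (fun x => x) false).foldl
        (pvStepA layer_comp_time) st)
    init
  PySem.List.sorted fin.2.1 pvRowKey false

-- ===== PORT B =====
-- one iteration of B's loop: argmin scan over the row costs, append, add
def pvStepB (layer_comp_time : List Int) (num_rows : Nat)
    (st : List (List Int) × List Int) (l : Int) : List (List Int) × List Int :=
  match PySem.List.min? (List.range num_rows)
      (fun i => (toLex (st.2.getD i 0, i) : Lex (Int × Nat))) with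
  | none => st    -- min() of an empty range: unreachable (a layer exists only if there is a row)
  | some idx =>
      (st.1.set idx (st.1.getD idx [] ++ [l]),
       st.2.set idx (st.2.getD idx 0 + pvT layer_comp_time l))

def balanced_transpose_alt (placement : List (List Int)) (layer_comp_time : List Int) : List (List Int) :=
  let num_rows := placement.length
  let layers := PySem.List.sorted placement.flatten
      (fun l => (toLex (-(pvT layer_comp_time l), l) : Lex (Int × Int))) false
  let fin := layers.foldl (pvStepB layer_comp_time num_rows)
      (List.replicate num_rows [], List.replicate num_rows (0 : Int))
  PySem.List.sorted fin.1 pvRowKey false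

-- ===== PRECONDITION & SPEC =====
-- Pre_ excludes exactly the inputs where Python A raises IndexError (a layer id that is not a
-- valid — possibly negative — index into layer_comp_time); Python B raises there as well.
def Pre_balanced_transpose (placement : List (List Int)) (layer_comp_time : List Int) : Prop :=
  ∀ row ∈ placement, ∀ l ∈ row,
    -(layer_comp_time.length : Int) ≤ l ∧ l < (layer_comp_time.length : Int)
instance (placement : List (List Int)) (layer_comp_time : List Int) : Decidable (Pre_balanced_transpose placement layer_comp_time) := by unfold Pre_balanced_transpose; infer_instance

def pvWitness_balanced_transpose : List (List Int) × List Int := ([[0, 1], [2]], [5, 3, 7])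

def Spec_balanced_transpose (placement : List (List Int)) (layer_comp_time : List Int) (out : List (List Int)) : Prop := out = balanced_transpose_alt placement layer_comp_time
instance (placement : List (List Int)) (layer_comp_time : List Int) (out : List (List Int)) : Decidable (Spec_balanced_transpose placement layer_comp_time out) := by unfold Spec_balanced_transpose; infer_instance

-- ===== CLAIM (what is proved, stated in full; the proofs are below) =====
def Claim_equal_balanced_transpose : Prop := ∀ (placement : List (List Int)) (layer_comp_time : List Int), Dom_balanced_transpose placement layer_comp_time → Pre_balanced_transpose placement layer_comp_time → Spec_balanced_transpose placement layer_comp_time (balanced_transpose placement layer_comp_time)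

-- ===== LEMMAS AND PROOFS =====

-- B's sort key
def pvKeyB (layer_comp_time : List Int) (l : Int) : Lex (Int × Int) :=
  toLex (-(pvT layer_comp_time l), l)

-- the multiset the heap always holds: one (current cost, idx) pair per row
def pvPairs (n : Nat) (cost : List Int) : List (Int × Nat) :=
  (List.range n).map (fun i => (cost.getD i 0, i))

def pvLe (a b : Int × Nat) : Prop := (toLex a : Lex (Int × Nat)) ≤ toLex b

-- the bisimulation invariant between A's state and B's state
def pvInv (n : Nat) (stA : List (Int × Nat) × List (List Int) × List Int)
    (stB : List (List Int) × List Int) : Prop :=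
  stA.2.1 = stB.1 ∧ stA.2.2 = stB.2 ∧ stB.2.length = n ∧
  stA.1.Perm (pvPairs n stB.2) ∧ stA.1.Pairwise pvLe

theorem pvKeyB_inj (lct : List Int) : Function.Injective (pvKeyB lct) := by
  intro a b h
  have := toLex.injective h
  exact congrArg Prod.snd this

theorem pvGroups_getD (placement : List (List Int)) (lct : List Int) (c : Int) :
    (pvGroups placement lct).getD c [] =
      placement.flatten.filter (fun l => pvT lct l == c) := by
  unfold pvGroups
  rw [← List.foldl_flatten]
  have h : placement.flatten.foldl
        (fun d l => d.modify (pvT lct l) [] (fun g => g ++ [l])) PySem.Dict.empty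
      = (placement.flatten.map (fun l => (pvT lct l, l))).foldl
        (fun d p => d.modify p.1 [] (fun g => g ++ [p.2])) PySem.Dict.empty := by
    rw [List.foldl_map]
  rw [h, PySem.Dict.getD_foldl_modify_append, List.filter_map]
  simp [List.map_map, Function.comp_def]

theorem pvGroups_keys (placement : List (List Int)) (lct : List Int) :
    (pvGroups placement lct).keys = PySem.Set.ofList (placement.flatten.map (pvT lct)) := by
  unfold pvGroups
  rw [← List.foldl_flatten]
  rw [PySem.Dict.keys_foldl_modify_key placement.flatten (pvT lct) []
        (fun _ x => fun g => g ++ [x]) PySem.Dict.empty]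
  rfl

-- the partition of a list by a nodup list of key values, concatenated, is a permutation
theorem pvPartition (t : Int → Int) (cs F : List Int) (hnd : cs.Nodup)
    (hall : ∀ l ∈ F, t l ∈ cs) :
    (cs.flatMap (fun c => F.filter (fun l => t l == c))).Perm F := by
  induction cs generalizing F with
  | nil =>
      cases F with
      | nil => simp
      | cons a F' => exact absurd (hall a (by simp)) (by simp)
  | cons c cs ih =>
      simp only [List.flatMap_cons]
      obtain ⟨hc, hnd'⟩ := List.nodup_cons.mp hnd
      have hcong : cs.flatMap (fun c' => F.filter (fun l => t l == c'))
          = cs.flatMap (fun c' => (F.filter (fun l => !(t l == c))).filter (fun l => t l == c')) := by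
        apply List.flatMap_congr
        intro c' hc'
        rw [List.filter_filter]
        apply List.filter_congr
        intro x _
        by_cases h' : t x = c'
        · by_cases hcc : t x = c
          · exact absurd ((h'.symm.trans hcc) ▸ hc') hc
          · simp only [h']
            simp only [beq_self_eq_true, Bool.true_and]
            symm
            simp only [Bool.not_eq_true', beq_eq_false_iff_ne, ne_eq]
            intro hh
            exact hcc (hh ▸ h')
        · simp [h']
      rw [hcong]
      have hall' : ∀ l ∈ F.filter (fun l => !(t l == c)), t l ∈ cs := by
        intro x hx
        obtain ⟨hxF, hxne⟩ := List.mem_filter.mp hx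
        have := hall x hxF
        simp only [List.mem_cons] at this
        rcases this with h | h
        · exact absurd hxne (by simp [h])
        · exact h
      have hperm := ih (F.filter (fun l => !(t l == c))) hnd' hall'
      exact ((List.Perm.append_left _ hperm).trans
        (List.filter_append_perm (fun l => t l == c) F))

-- flatMap respects piecewise permutation
theorem pvFlatMapPerm {α β : Type} (cs : List α) (f g : α → List β)
    (h : ∀ c ∈ cs, (f c).Perm (g c)) : (cs.flatMap f).Perm (cs.flatMap g) := by
  induction cs with
  | nil => simp
  | cons c cs ih =>
      simp only [List.flatMap_cons]
      exact (h c (by simp)).append (ih (fun c' hc' => h c' (by simp [hc'])))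

-- A's processing order (comp times descending, layers ascending inside a group) is exactly
-- B's single sort of all layers
theorem pvOrder (placement : List (List Int)) (lct : List Int) :
    (PySem.List.sorted (pvGroups placement lct).keys (fun x => x) true).flatMap
        (fun c => PySem.List.sorted ((pvGroups placement lct).getD c []) (fun x => x) false)
      = PySem.List.sorted placement.flatten (pvKeyB lct) false := by
  have hkeys := pvGroups_keys placement lct
  set F := placement.flatten with hF
  set cs := PySem.List.sorted (pvGroups placement lct).keys (fun x => x) true with hcs
  have hcsperm : cs.Perm (pvGroups placement lct).keys := PySem.List.sorted_perm _ _ _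
  have hndkeys : (pvGroups placement lct).keys.Nodup := by
    rw [hkeys]; exact PySem.Set.nodup_ofList _
  have hnd : cs.Nodup := (hcsperm.nodup_iff).mpr hndkeys
  have hdesc : cs.Pairwise (fun a b => b < a) := by
    have h1 : cs.Pairwise (fun a b => b ≤ a) := PySem.List.sorted_pairwise_rev _ _
    exact (h1.and hnd).imp (fun h => lt_of_le_of_ne h.1 (Ne.symm h.2))
  have hall : ∀ l ∈ F, pvT lct l ∈ cs := by
    intro l hl
    rw [hcsperm.mem_iff, hkeys, PySem.Set.mem_ofList]
    exact List.mem_map.mpr ⟨l, hl, rfl⟩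
  have hmemG : ∀ (c : Int) (x : Int),
      x ∈ PySem.List.sorted (F.filter (fun l => pvT lct l == c)) (fun x => x) false → pvT lct x = c := by
    intro c x hx
    rw [PySem.List.mem_sorted] at hx
    exact beq_iff_eq.mp (List.mem_filter.mp hx).2
  have hgroups : ∀ c, (pvGroups placement lct).getD c [] = F.filter (fun l => pvT lct l == c) :=
    fun c => pvGroups_getD placement lct c
  simp only [hgroups]
  apply List.Perm.eq_of_pairwise (le := fun a b => pvKeyB lct a ≤ pvKeyB lct b)
  · intro a b _ _ h1 h2
    exact pvKeyB_inj lct (le_antisymm h1 h2)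
  · rw [List.pairwise_flatMap]
    constructor
    · intro c _
      have h1 := PySem.List.sorted_pairwise (F.filter (fun l => pvT lct l == c)) (fun x => x)
      apply h1.imp_of_mem
      intro a b ha hb hab
      have hta := hmemG c a ha
      have htb := hmemG c b hb
      unfold pvKeyB
      rw [Prod.Lex.toLex_le_toLex]
      exact Or.inr ⟨by simp [hta, htb], hab⟩
    · apply hdesc.imp
      intro c1 c2 hlt x hx y hy
      have htx := hmemG c1 x hx
      have hty := hmemG c2 y hy
      unfold pvKeyB
      rw [Prod.Lex.toLex_le_toLex]
      refine Or.inl ?_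
      simp only []
      simp [htx, hty]
      omega
  · exact PySem.List.sorted_pairwise F (pvKeyB lct)
  · have h1 : (cs.flatMap (fun c =>
        PySem.List.sorted (F.filter (fun l => pvT lct l == c)) (fun x => x) false)).Perm
        (cs.flatMap (fun c => F.filter (fun l => pvT lct l == c))) :=
      pvFlatMapPerm _ _ _ (fun c _ => PySem.List.sorted_perm _ _ _)
    have h2 := pvPartition (pvT lct) cs F hnd hall
    exact (h1.trans h2).trans (PySem.List.sorted_perm F (pvKeyB lct) false).symm

theorem pvPairs_set (n : Nat) (cost : List Int) (j : Nat) (v : Int)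
    (hj : j < n) (hlen : cost.length = n) :
    pvPairs n (cost.set j v) = (pvPairs n cost).set j (v, j) := by
  apply List.ext_getElem
  · simp [pvPairs]
  · intro i h1 h2
    have hi : i < n := by simpa [pvPairs] using h1
    simp only [pvPairs, List.getElem_set, List.getElem_map, List.getElem_range,
      List.getD_eq_getElem?_getD, List.getElem?_set]
    by_cases hij : j = i
    · subst hij
      simp [hlen, hj]
    · simp [hij]

theorem pvPerm_set {β : Type} (L : List β) (j : Nat) (hj : j < L.length) (x : β)
    (tl : List β) (h : (L[j] :: tl).Perm L) : (x :: tl).Perm (L.set j x) := by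
  have hdecomp : L = L.take j ++ L[j] :: L.drop (j + 1) := by
    conv_lhs => rw [← List.take_append_drop j L]
    rw [← List.getElem_cons_drop hj]
  have hset : L.set j x = L.take j ++ x :: L.drop (j + 1) := by
    rw [List.set_eq_take_append_cons_drop]; simp [hj]
  have htl : tl.Perm (L.take j ++ L.drop (j + 1)) := by
    have h2 : (L[j] :: tl).Perm (L.take j ++ L[j] :: L.drop (j + 1)) := hdecomp ▸ h
    exact List.Perm.cons_inv (h2.trans List.perm_middle)
  rw [hset]
  exact ((htl.cons x).trans List.perm_middle.symm)

-- one step preserves the invariant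
theorem pvStep_inv (lct : List Int) (n : Nat) (stA : List (Int × Nat) × List (List Int) × List Int)
    (stB : List (List Int) × List Int) (l : Int) (h : pvInv n stA stB) :
    pvInv n (pvStepA lct stA l) (pvStepB lct n stB l) := by
  obtain ⟨heap, place, cost⟩ := stA
  obtain ⟨placeB, costB⟩ := stB
  obtain ⟨hpl, hco, hlen, hperm, hpw⟩ := h
  dsimp only at hpl hco hlen hperm hpw
  subst hpl hco
  cases heap with
  | nil =>
      have hnil : pvPairs n cost = [] := List.Perm.nil_eq hperm |>.symm
      have hn : n = 0 := by
        have := congrArg List.length hnil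
        simpa [pvPairs] using this
      subst hn
      unfold pvStepA pvStepB
      simp only [List.range_zero]
      exact ⟨rfl, rfl, hlen, hperm, hpw⟩
  | cons p tl =>
      -- the heap is nonempty, so is the row range; find B's argmin j
      have hlenpairs : (pvPairs n cost).length = n := by simp [pvPairs]
      have hne : pvPairs n cost ≠ [] := by
        intro hh
        rw [hh] at hperm
        exact absurd (List.Perm.nil_eq hperm.symm) (by simp)
      obtain ⟨j, hmin⟩ : ∃ j, PySem.List.min? (List.range n)
          (fun i => (toLex (cost.getD i 0, i) : Lex (Int × Nat))) = some j := by
        cases hm : PySem.List.min? (List.range n)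
            (fun i => (toLex (cost.getD i 0, i) : Lex (Int × Nat))) with
        | none =>
            rw [PySem.List.min?_eq_none_iff] at hm
            exact absurd (by unfold pvPairs; rw [hm]; rfl) hne
        | some j => exact ⟨j, rfl⟩
      have hjn : j < n := List.mem_range.mp (PySem.List.min?_mem hmin)
      have hjmem : (cost.getD j 0, j) ∈ pvPairs n cost := by
        unfold pvPairs
        exact List.mem_map.mpr ⟨j, List.mem_range.mpr hjn, rfl⟩
      -- the heap head is minimal among all queued pairs
      have hheadmin : ∀ q ∈ pvPairs n cost, pvLe p q := by
        intro q hq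
        have : q ∈ p :: tl := hperm.symm.subset hq
        rcases List.mem_cons.mp this with h | h
        · rw [h]; exact le_refl _
        · exact List.rel_of_pairwise_cons hpw h
      -- and so is B's argmin pair; by antisymmetry they coincide
      have hpmem : p ∈ pvPairs n cost := hperm.subset (List.mem_cons_self)
      obtain ⟨i0, hi0r, hi0⟩ := List.mem_map.mp hpmem
      have h1 : pvLe p (cost.getD j 0, j) := hheadmin _ hjmem
      have h2 : (toLex ((cost.getD j 0, j) : Int × Nat) : Lex (Int × Nat)) ≤ toLex p := by
        rw [← hi0]
        exact PySem.List.min?_isMin hmin i0 hi0r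
      have hpj : p = (cost.getD j 0, j) := toLex.injective (le_antisymm h1 h2)
      -- both sides perform the same update at row j
      unfold pvStepA pvStepB
      dsimp only
      rw [hmin, hpj]
      refine ⟨rfl, rfl, by simp [hlen], ?_, ?_⟩
      · -- permutation: pop the head, push the updated pair
        dsimp only
        refine (PySem.List.insertBy_perm _ _ _).trans ?_
        rw [pvPairs_set n cost j _ hjn hlen]
        apply pvPerm_set (pvPairs n cost) j (by rw [hlenpairs]; exact hjn)
        have hgj : (pvPairs n cost)[j]'(by rw [hlenpairs]; exact hjn) = (cost.getD j 0, j) := by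
          simp [pvPairs]
        rw [hgj, ← hpj]
        exact hperm
      · -- pairwise: ordered insert into the sorted tail
        dsimp only
        have htail : tl.Pairwise pvLe := (List.pairwise_cons.mp hpw).2
        exact PySem.List.insertBy_pairwise_le (fun q => (toLex q : Lex (Int × Nat))) _ tl htail

theorem pvFold_inv (lct : List Int) (n : Nat) (layers : List Int)
    (stA : List (Int × Nat) × List (List Int) × List Int)
    (stB : List (List Int) × List Int) (h : pvInv n stA stB) :
    pvInv n (layers.foldl (pvStepA lct) stA) (layers.foldl (pvStepB lct n) stB) := by
  induction layers generalizing stA stB with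
  | nil => exact h
  | cons l ls ih => exact ih _ _ (pvStep_inv lct n stA stB l h)

theorem pvInit_inv (n : Nat) :
    pvInv n
      (pvHeapify ((List.range n).map (fun i => ((0 : Int), i))),
       (List.range n).map (fun _ => []),
       (List.range n).map (fun _ => (0 : Int)))
      (List.replicate n [], List.replicate n (0 : Int)) := by
  have hpairs : pvPairs n (List.replicate n (0 : Int))
      = (List.range n).map (fun i => ((0 : Int), i)) := by
    unfold pvPairs
    apply List.map_congr_left
    intro i hi
    rw [List.getD_replicate _ (List.mem_range.mp hi)]
  refine ⟨?_, ?_, ?_, ?_, ?_⟩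
  · show (List.range n).map (fun _ => ([] : List Int)) = List.replicate n []
    simp
  · show (List.range n).map (fun _ => (0 : Int)) = List.replicate n 0
    simp
  · simp
  · show (pvHeapify ((List.range n).map (fun i => ((0 : Int), i)))).Perm _
    rw [hpairs]
    exact PySem.List.sorted_perm _ _ _
  · exact PySem.List.sorted_pairwise _ _

-- ===== VERDICT (by name: the statement is the Claim_ definition above) =====
theorem balanced_transpose_spec : Claim_equal_balanced_transpose := by
  intro placement lct _hdom _hpre
  unfold Spec_balanced_transpose
  dsimp only [balanced_transpose, balanced_transpose_alt]
  rw [← List.foldl_flatMap, pvOrder]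
  have h := pvFold_inv lct placement.length
    (PySem.List.sorted placement.flatten (pvKeyB lct) false) _ _ (pvInit_inv placement.length)
  exact congrArg (fun x => PySem.List.sorted x pvRowKey false) h.1
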